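-- pv_equiv track=rewrite | github.com/itaialcalai/FingerPrint | src/helper_functions.py | map_indices
-- ===== SOURCE A (Python) =====
-- def map_indices(rfus, mod_value=80):
--     length = len(rfus)
--     result = [None] * length
--
--     current_value = 1
--     index = 0
--
--     while index < length:
--         for i in range(0, length, mod_value):
--             if index + i < length:
--                 result[index + i] = current_value
--             else:
--                 break
--         current_value += 1
--         index += 1
--
--     return result
-- ===== SOURCE B (Python) =====
-- def map_indices(rfus, mod_value=80):
--     # The final write to each slot j is made in the while-iteration index == j
--     # (with current_value == j + 1), so the filled array is simply 1..len(rfus).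
--     return list(range(1, len(rfus) + 1))
-- ===== Notes on version B (the rewrite author's own statement) =====
-- stated objective: faster
-- what changed: B replaces the nested while/for filling loop (whose last write to slot j is always j+1) with the closed form list(range(1, len(rfus)+1)).
-- outside the precondition, e.g. on map_indices([5], -1): A returns [None], B returns [1]; on map_indices([7], 0): A raises ValueError, B returns [1]
import Mathlib
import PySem

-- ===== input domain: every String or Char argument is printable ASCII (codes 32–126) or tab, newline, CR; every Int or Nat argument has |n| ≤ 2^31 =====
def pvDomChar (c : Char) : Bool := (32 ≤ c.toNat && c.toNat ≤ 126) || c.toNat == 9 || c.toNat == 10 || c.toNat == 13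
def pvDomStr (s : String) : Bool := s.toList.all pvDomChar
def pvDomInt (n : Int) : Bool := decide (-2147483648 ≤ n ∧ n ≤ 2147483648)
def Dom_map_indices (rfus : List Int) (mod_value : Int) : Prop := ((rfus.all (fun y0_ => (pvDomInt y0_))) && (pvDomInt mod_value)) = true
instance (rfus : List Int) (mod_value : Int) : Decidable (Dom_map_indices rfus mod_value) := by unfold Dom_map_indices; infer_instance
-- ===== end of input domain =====

-- B is the closed form list(range(1, len(rfus)+1)): A's nested loops write slot j last at
-- while-iteration index == j with value j+1, so the filled array is exactly [1..n].

-- ===== PORT A =====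
-- inner 'for i in range(0, length, mod_value)' with its break; result cells are Option Int
-- mirroring the [None]*length buffer.  Under Pre_ every written index i is ≥ 0, so
-- 'i.toNat' is exact there.
def pvInnerA (len index : Nat) (cur : Int) : List Int → List (Option Int) → List (Option Int)
  | [], res => res
  | i :: rest, res =>
      if (index : Int) + i < (len : Int) then
        pvInnerA len index cur rest (res.set (index + i.toNat) (some cur))
      else res

-- 'while index < length' as fuel-counted recursion (fuel = length suffices exactly)
def pvOuterA (len : Nat) (m : Int) : Nat → Nat → Int → List (Option Int) → List (Option Int)
  | 0, _, _, res => res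
  | fuel+1, index, cur, res =>
      if index < len then
        pvOuterA len m fuel (index + 1) (cur + 1)
          (pvInnerA len index cur (PySem.List.pyRange 0 (len : Int) m) res)
      else res

-- the final '.map (·.getD 0)' extracts the Int values; exact under Pre_, where every slot
-- has been written (Python returns the list of ints there)
def map_indices (rfus : List Int) (mod_value : Int) : List Int :=
  (pvOuterA rfus.length mod_value rfus.length 0 1
      (List.replicate rfus.length (none : Option Int))).map (fun o => o.getD 0)

-- ===== PORT B =====
def map_indices_alt (rfus : List Int) (mod_value : Int) : List Int :=
  PySem.List.pyRange 1 ((rfus.length : Int) + 1) 1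

-- ===== PRECONDITION & SPEC =====
-- Pre_ excludes inputs where A raises (mod_value = 0 with non-empty rfus: range step 0 is
-- ValueError) or returns a list of None, not ints (mod_value < 0 with non-empty rfus).
def Pre_map_indices (rfus : List Int) (mod_value : Int) : Prop :=
  0 < mod_value ∨ rfus = []
instance (rfus : List Int) (mod_value : Int) : Decidable (Pre_map_indices rfus mod_value) := by
  unfold Pre_map_indices; infer_instance

def pvWitness_map_indices : List Int × Int := ([3, 4], 2)

def Spec_map_indices (rfus : List Int) (mod_value : Int) (out : List Int) : Prop :=
  out = map_indices_alt rfus mod_value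
instance (rfus : List Int) (mod_value : Int) (out : List Int) : Decidable (Spec_map_indices rfus mod_value out) := by
  unfold Spec_map_indices; infer_instance

-- ===== CLAIM (what is proved, stated in full; the proofs are below) =====
def Claim_equal_map_indices : Prop := ∀ (rfus : List Int) (mod_value : Int), Dom_map_indices rfus mod_value → Pre_map_indices rfus mod_value → Spec_map_indices rfus mod_value (map_indices rfus mod_value)

-- ===== LEMMAS AND PROOFS =====

theorem pvInnerA_length (len index : Nat) (cur : Int) :
    ∀ (is : List Int) (res : List (Option Int)),
      (pvInnerA len index cur is res).length = res.length := by
  intro is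
  induction is with
  | nil => intro res; rfl
  | cons i rest ih =>
      intro res
      simp only [pvInnerA]
      split
      · rw [ih]; simp
      · rfl

theorem pvInnerA_untouched (len index : Nat) (cur : Int) (p : Nat) :
    ∀ (is : List Int) (res : List (Option Int)),
      (∀ i ∈ is, p ≠ index + i.toNat) →
      (pvInnerA len index cur is res)[p]? = res[p]? := by
  intro is
  induction is with
  | nil => intro res _; rfl
  | cons i rest ih =>
      intro res h
      simp only [pvInnerA]
      split
      · rw [ih _ (fun j hj => h j (List.mem_cons_of_mem _ hj)),
          List.getElem?_set_ne (Ne.symm (h i (List.mem_cons_self)))]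
      · rfl

theorem pvInnerA_get_lt (len index : Nat) (cur : Int) (m : Int) (hm : 0 < m)
    (p : Nat) (hp : p < index) (res : List (Option Int)) :
    (pvInnerA len index cur (PySem.List.pyRange 0 (len : Int) m) res)[p]? = res[p]? := by
  apply pvInnerA_untouched
  intro i hi
  have h0 : (0:Int) ≤ i := ((PySem.List.mem_pyRange_iff_of_pos hm i).1 hi).1
  omega

theorem pvInnerA_get_self (len index : Nat) (cur : Int) (m : Int) (hm : 0 < m)
    (hlt : index < len) (res : List (Option Int)) (hres : res.length = len) :
    (pvInnerA len index cur (PySem.List.pyRange 0 (len : Int) m) res)[index]? =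
      some (some cur) := by
  rw [PySem.List.pyRange_of_pos _ _ hm]
  have hab : (0:Int) < (len : Int) := by exact_mod_cast Nat.zero_lt_of_lt hlt
  rw [if_pos hab]
  have hcnt : 1 ≤ (((len : Int) - 0 + m - 1) / m) := by
    rw [Int.le_ediv_iff_mul_le hm]; omega
  obtain ⟨c, hc⟩ : ∃ c, (((len : Int) - 0 + m - 1) / m).toNat = c + 1 :=
    ⟨(((len : Int) - 0 + m - 1) / m).toNat - 1, by omega⟩
  rw [hc, List.range_succ_eq_map, List.map_cons]
  simp only [pvInnerA, Nat.cast_zero, mul_zero, add_zero]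
  rw [if_pos (by exact_mod_cast hlt)]
  have htail : ∀ i ∈ List.map (fun (k : Nat) => (0:Int) + m * (k : Int)) (List.map Nat.succ (List.range c)),
      index ≠ index + i.toNat := by
    intro i hi
    simp only [List.mem_map] at hi
    obtain ⟨k, ⟨k', _, rfl⟩, rfl⟩ := hi
    have hpos : (0:Int) < m * ((Nat.succ k' : Nat) : Int) := by
      apply mul_pos hm; exact_mod_cast Nat.succ_pos k'
    omega
  rw [pvInnerA_untouched _ _ _ _ _ _ htail]
  simp only [Int.toNat_zero, Nat.add_zero]
  rw [List.getElem?_set_self (by omega)]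

theorem pvOuterA_get (len : Nat) (m : Int) (hm : 0 < m) :
    ∀ (fuel index : Nat) (res : List (Option Int)),
      res.length = len → len ≤ index + fuel →
      ∀ p, p < len →
        (pvOuterA len m fuel index ((index : Int) + 1) res)[p]? =
          if index ≤ p then some (some ((p : Int) + 1)) else res[p]? := by
  intro fuel
  induction fuel with
  | zero =>
      intro index res hres hfuel p hp
      rw [if_neg (by omega)]
      rfl
  | succ fuel ih =>
      intro index res hres hfuel p hp
      simp only [pvOuterA]
      by_cases hidx : index < len
      · rw [if_pos hidx]
        have hcast : ((index : Int) + 1) + 1 = ((index + 1 : Nat) : Int) + 1 := by push_cast; ring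
        rw [hcast]
        rw [ih (index + 1) _ (by rw [pvInnerA_length]; exact hres) (by omega) p hp]
        by_cases h1 : index + 1 ≤ p
        · rw [if_pos h1, if_pos (by omega)]
        · by_cases h2 : p = index
          · subst h2
            rw [if_neg h1, if_pos (le_refl _), pvInnerA_get_self len p _ m hm hidx res hres]
          · rw [if_neg h1, if_neg (by omega), pvInnerA_get_lt len index _ m hm p (by omega)]
      · rw [if_neg hidx, if_neg (by omega)]

theorem pvOuterA_length (len : Nat) (m : Int) :
    ∀ (fuel index : Nat) (cur : Int) (res : List (Option Int)),
      (pvOuterA len m fuel index cur res).length = res.length := by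
  intro fuel
  induction fuel with
  | zero => intro index cur res; rfl
  | succ fuel ih =>
      intro index cur res
      simp only [pvOuterA]
      split
      · rw [ih, pvInnerA_length]
      · rfl

theorem map_indices_spec : Claim_equal_map_indices := by
  intro rfus m _ hpre
  unfold Spec_map_indices
  by_cases hnil : rfus = []
  · subst hnil
    simp [map_indices, map_indices_alt, pvOuterA, PySem.List.pyRange_one_eq_nil (le_refl (1:Int))]
  · have hm : 0 < m := by
      rcases hpre with h | h
      · exact h
      · exact absurd h hnil
    unfold map_indices map_indices_alt
    set n := rfus.length with hn
    apply List.ext_getElem?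
    intro p
    by_cases hp : p < n
    · rw [List.getElem?_map]
      have houter := pvOuterA_get n m hm n 0 (List.replicate n (none : Option Int))
        (by simp) (by omega) p hp
      norm_num at houter
      rw [houter, PySem.List.getElem?_pyRange_one, if_pos (by omega)]
      simp [add_comm]
    · rw [List.getElem?_eq_none, List.getElem?_eq_none]
      · rw [PySem.List.length_pyRange_one]; omega
      · rw [List.length_map, pvOuterA_length]; simp; omega
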